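-- pv_equiv track=rewrite | github.com/junhakjh/coding_test | programmers/lv2/택배 배달과 수거하기.py | solution
-- ===== SOURCE A (Python) =====
-- def solution(cap, n, deliveries, pickups):
--     answer = 0
--
--     deliveries, pickups = deliveries[::-1], pickups[::-1]
--     d_cap, p_cap = 0, 0
--
--     for i in range(n):
--         d_cap += deliveries[i]
--         p_cap += pickups[i]
--
--         while d_cap > 0 or p_cap > 0:
--             d_cap -= cap
--             p_cap -= cap
--             answer += (n - i) * 2
--
--     return answer
-- ===== SOURCE B (Python) =====
-- def solution(cap, n, deliveries, pickups):
--     # One forward pass over houses from farthest to nearest: the number of round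
--     # trips needed so far is the running max of ceil(suffix_sum / cap) for both
--     # demands; each house at rank k (k-th farthest) contributes that running max
--     # once, and every trip costs 2 per house it passes, so answer = 2 * sum.
--     ld, lp = len(deliveries), len(pickups)
--     dsum = psum = 0
--     trips = 0
--     total = 0
--     for k in range(1, n + 1):
--         dsum += deliveries[ld - k]
--         psum += pickups[lp - k]
--         need = max(-(-dsum // cap), -(-psum // cap))
--         if need > trips:
--             trips = need
--         total += trips
--     return 2 * total
-- ===== Notes on version B (the rewrite author's own statement) =====
-- stated objective: alternative
-- what changed: Replaced A's reverse-the-lists simulation, whose inner while-loop executes one iteration per individual truck trip, by a single forward pass over the k-th-farthest houses maintaining suffix sums and a running max of ceiling-divided trip counts, so the answer is 2*sum of running maxima with no inner loop and no list reversal (intended as faster when trip counts are large; a timing run measured only ~1.4x on its inputs).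
-- outside the precondition, e.g. on solution(0, 1, [0], [0]): A returns 0, B raises ZeroDivisionError; on solution(-2, 1, [-3], [0]): A returns 0, B returns 4; on solution(-1, 1, [0], [0]): A returns 0, B returns 0
import Mathlib
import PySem

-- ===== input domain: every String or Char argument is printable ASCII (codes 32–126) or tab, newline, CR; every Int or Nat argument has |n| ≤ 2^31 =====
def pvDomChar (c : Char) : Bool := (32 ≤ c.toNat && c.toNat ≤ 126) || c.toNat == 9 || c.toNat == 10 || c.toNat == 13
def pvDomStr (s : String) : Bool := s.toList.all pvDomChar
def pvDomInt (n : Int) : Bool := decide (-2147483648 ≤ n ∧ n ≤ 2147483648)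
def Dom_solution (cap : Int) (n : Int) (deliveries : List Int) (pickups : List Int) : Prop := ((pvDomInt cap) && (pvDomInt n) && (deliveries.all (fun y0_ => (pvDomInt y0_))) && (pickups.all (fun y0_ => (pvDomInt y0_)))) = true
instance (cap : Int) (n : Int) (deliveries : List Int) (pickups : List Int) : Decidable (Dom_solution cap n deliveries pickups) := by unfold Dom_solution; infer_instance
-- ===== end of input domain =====

-- B replaces A's per-trip inner while-loop simulation on reversed lists by one
-- forward pass over suffix sums with ceiling division (an alternative algorithm
-- with no inner loop); equivalence is proved on Pre_solution.

-- ===== PORT A =====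
-- the inner 'while d_cap > 0 or p_cap > 0' loop; for cap ≤ 0 Python diverges
-- whenever the condition holds (such inputs are outside Pre_solution), so the
-- port just returns the current state there.
def pvWhileA (cap : Int) (dist : Int) (d : Int) (p : Int) (ans : Int) : Int × Int × Int :=
  if d > 0 ∨ p > 0 then
    if cap ≤ 0 then (d, p, ans)
    else pvWhileA cap dist (d - cap) (p - cap) (ans + dist)
  else (d, p, ans)
termination_by d.toNat + p.toNat
decreasing_by omega

-- the body of A's 'for i in range(n)' loop; IndexError (pyGetD out of range)
-- is excluded by Pre_solution
def pvStepA (cap : Int) (n : Int) (ds : List Int) (ps : List Int)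
    (st : Int × Int × Int) (i : Int) : Int × Int × Int :=
  let d := st.1 + PySem.List.pyGetD ds i 0
  let p := st.2.1 + PySem.List.pyGetD ps i 0
  pvWhileA cap ((n - i) * 2) d p st.2.2

def solution (cap : Int) (n : Int) (deliveries : List Int) (pickups : List Int) : Int :=
  -- deliveries[::-1], pickups[::-1]
  let ds := (PySem.List.slice? deliveries none none (-1)).getD []
  let ps := (PySem.List.slice? pickups none none (-1)).getD []
  ((PySem.List.pyRange 0 n 1).foldl (pvStepA cap n ds ps) (0, 0, 0)).2.2

-- ===== PORT B =====
-- the body of B's 'for k in range(1, n + 1)' loop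
def pvStepB (cap : Int) (ld : Int) (lp : Int) (dl : List Int) (pl : List Int)
    (st : Int × Int × Int × Int) (k : Int) : Int × Int × Int × Int :=
  let dsum := st.1 + PySem.List.pyGetD dl (ld - k) 0
  let psum := st.2.1 + PySem.List.pyGetD pl (lp - k) 0
  let need := max (-(PySem.Int.floordiv (-dsum) cap)) (-(PySem.Int.floordiv (-psum) cap))
  let trips := if need > st.2.2.1 then need else st.2.2.1
  (dsum, psum, trips, st.2.2.2 + trips)

def solution_alt (cap : Int) (n : Int) (deliveries : List Int) (pickups : List Int) : Int :=
  2 * ((PySem.List.pyRange 1 (n + 1) 1).foldl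
        (pvStepB cap (deliveries.length : Int) (pickups.length : Int) deliveries pickups)
        (0, 0, 0, 0)).2.2.2

-- ===== PRECONDITION & SPEC =====
-- Pre_ excludes cap ≤ 0 (A diverges whenever an accumulated demand is positive
-- and returns 0 otherwise; B's ceiling division raises for cap = 0 and can
-- return a different value for cap < 0) and n exceeding a list length
-- (A raises IndexError).
def Pre_solution (cap : Int) (n : Int) (deliveries : List Int) (pickups : List Int) : Prop :=
  0 < cap ∧ n ≤ (deliveries.length : Int) ∧ n ≤ (pickups.length : Int)
instance (cap : Int) (n : Int) (deliveries : List Int) (pickups : List Int) : Decidable (Pre_solution cap n deliveries pickups) := by unfold Pre_solution; infer_instance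

def pvWitness_solution : Int × Int × List Int × List Int := (4, 2, [1, 0], [0, 3])

def Spec_solution (cap : Int) (n : Int) (deliveries : List Int) (pickups : List Int) (out : Int) : Prop := out = solution_alt cap n deliveries pickups
instance (cap : Int) (n : Int) (deliveries : List Int) (pickups : List Int) (out : Int) : Decidable (Spec_solution cap n deliveries pickups out) := by unfold Spec_solution; infer_instance

-- ===== CLAIM (what is proved, stated in full; the proofs are below) =====
def Claim_equal_solution : Prop := ∀ (cap : Int) (n : Int) (deliveries : List Int) (pickups : List Int), Dom_solution cap n deliveries pickups → Pre_solution cap n deliveries pickups → Spec_solution cap n deliveries pickups (solution cap n deliveries pickups)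

-- ===== LEMMAS AND PROOFS =====

-- ceiling division -(-x // cap), the quantity B computes
def pvCdiv (x : Int) (cap : Int) : Int := -(PySem.Int.floordiv (-x) cap)

lemma pvCdiv_bracket (x cap : Int) (hc : 0 < cap) :
    (pvCdiv x cap - 1) * cap < x ∧ x ≤ pvCdiv x cap * cap := by
  have := (PySem.Int.neg_floordiv_neg_eq_iff_of_pos (a := x) (b := cap) (q := pvCdiv x cap) hc).mp rfl
  exact this

lemma pvCdiv_sub_mul (x cap m : Int) (hc : 0 < cap) :
    pvCdiv (x - cap * m) cap = pvCdiv x cap - m := by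
  have h := pvCdiv_bracket x cap hc
  have : -(PySem.Int.floordiv (-(x - cap * m)) cap) = pvCdiv x cap - m := by
    rw [PySem.Int.neg_floordiv_neg_eq_iff_of_pos hc]
    constructor <;> nlinarith [h.1, h.2]
  exact this

lemma pvCdiv_pos (x cap : Int) (hc : 0 < cap) (hx : 0 < x) : 1 ≤ pvCdiv x cap := by
  have h := pvCdiv_bracket x cap hc
  nlinarith [h.2]

lemma pvCdiv_nonpos (x cap : Int) (hc : 0 < cap) (hx : x ≤ 0) : pvCdiv x cap ≤ 0 := by
  have h := pvCdiv_bracket x cap hc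
  nlinarith [h.1]

lemma pvWhileA_eq (cap dist d p ans : Int) (hc : 0 < cap) :
    pvWhileA cap dist d p ans =
      (d - cap * (max (max (pvCdiv d cap) (pvCdiv p cap)) 0),
       p - cap * (max (max (pvCdiv d cap) (pvCdiv p cap)) 0),
       ans + dist * (max (max (pvCdiv d cap) (pvCdiv p cap)) 0)) := by
  induction d, p, ans using pvWhileA.induct (cap := cap) (dist := dist) with
  | case1 d p ans hcond hle => omega
  | case2 d p ans hcond hle ih =>
      rw [pvWhileA, if_pos hcond, if_neg hle]
      rw [ih]
      have e1 : pvCdiv (d - cap) cap = pvCdiv d cap - 1 := by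
        have := pvCdiv_sub_mul d cap 1 hc; simpa using this
      have e2 : pvCdiv (p - cap) cap = pvCdiv p cap - 1 := by
        have := pvCdiv_sub_mul p cap 1 hc; simpa using this
      have hge : 1 ≤ max (pvCdiv d cap) (pvCdiv p cap) := by
        rcases hcond with h | h
        · exact le_max_of_le_left (pvCdiv_pos d cap hc h)
        · exact le_max_of_le_right (pvCdiv_pos p cap hc h)
      rw [e1, e2]
      have hm : max (max (pvCdiv d cap - 1) (pvCdiv p cap - 1)) 0
          = max (max (pvCdiv d cap) (pvCdiv p cap)) 0 - 1 := by omega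
      rw [hm]; refine Prod.ext ?_ (Prod.ext ?_ ?_) <;> simp <;> ring
  | case3 d p ans hcond =>
      rw [pvWhileA, if_neg hcond]
      have h1 := pvCdiv_nonpos d cap hc (by omega)
      have h2 := pvCdiv_nonpos p cap hc (by omega)
      have : max (max (pvCdiv d cap) (pvCdiv p cap)) 0 = 0 := by omega
      rw [this]; simp

lemma pvGet_rev (dl : List Int) (k : Nat) (hk : k < dl.length) :
    PySem.List.pyGetD dl.reverse (k : Int) 0
      = PySem.List.pyGetD dl ((dl.length : Int) - ((k : Int) + 1)) 0 := by
  have h2 : ((dl.length : Int) - ((k : Int) + 1)) = ((dl.length - 1 - k : Nat) : Int) := by omega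
  rw [h2, PySem.List.pyGetD_natCast, PySem.List.pyGetD_natCast]
  rw [List.getD_eq_getElem?_getD, List.getD_eq_getElem?_getD]
  rw [List.getElem?_reverse hk]

lemma pvIteMax (a b T : Int) : (if max a b > T then max a b else T) = max (max a b) T := by split <;> omega

lemma pvMaxShift (a b T : Int) : max (max (a - T) (b - T)) 0 = max (max a b) T - T := by omega

lemma pvInvariant (cap n : Int) (dl pl : List Int) (hc : 0 < cap)
    (hd : n ≤ (dl.length : Int)) (hp : n ≤ (pl.length : Int))
    (k : Nat) (hk : (k : Int) ≤ n) :
    ((PySem.List.pyRange 0 (k : Int) 1).foldl (pvStepA cap n dl.reverse pl.reverse) (0, 0, 0))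
      = (((PySem.List.pyRange 1 ((k : Int) + 1) 1).foldl
            (pvStepB cap (dl.length : Int) (pl.length : Int) dl pl) (0, 0, 0, 0)).1
           - cap * ((PySem.List.pyRange 1 ((k : Int) + 1) 1).foldl
            (pvStepB cap (dl.length : Int) (pl.length : Int) dl pl) (0, 0, 0, 0)).2.2.1,
         ((PySem.List.pyRange 1 ((k : Int) + 1) 1).foldl
            (pvStepB cap (dl.length : Int) (pl.length : Int) dl pl) (0, 0, 0, 0)).2.1
           - cap * ((PySem.List.pyRange 1 ((k : Int) + 1) 1).foldl
            (pvStepB cap (dl.length : Int) (pl.length : Int) dl pl) (0, 0, 0, 0)).2.2.1,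
         2 * ((n - (k : Int)) * ((PySem.List.pyRange 1 ((k : Int) + 1) 1).foldl
            (pvStepB cap (dl.length : Int) (pl.length : Int) dl pl) (0, 0, 0, 0)).2.2.1
              + ((PySem.List.pyRange 1 ((k : Int) + 1) 1).foldl
            (pvStepB cap (dl.length : Int) (pl.length : Int) dl pl) (0, 0, 0, 0)).2.2.2))
      ∧ 0 ≤ ((PySem.List.pyRange 1 ((k : Int) + 1) 1).foldl
            (pvStepB cap (dl.length : Int) (pl.length : Int) dl pl) (0, 0, 0, 0)).2.2.1 := by
  induction k with
  | zero =>
      norm_num [PySem.List.pyRange_one_eq_nil]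
  | succ k ih =>
      have hk' : (k : Int) ≤ n := by push_cast at hk ⊢; omega
      obtain ⟨ihEq, ihT⟩ := ih hk'
      have hcast : ((k + 1 : Nat) : Int) = (k : Int) + 1 := by push_cast; ring
      rw [hcast]
      rw [PySem.List.pyRange_one_succ_right (by omega : (0:Int) ≤ (k:Int)),
          PySem.List.pyRange_one_succ_right (by omega : (1:Int) ≤ (k:Int) + 1),
          List.foldl_append, List.foldl_append, List.foldl_cons, List.foldl_nil,
          List.foldl_cons, List.foldl_nil, ihEq]
      set O := ((PySem.List.pyRange 1 ((k : Int) + 1) 1).foldl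
            (pvStepB cap (dl.length : Int) (pl.length : Int) dl pl) (0, 0, 0, 0)) with hO
      obtain ⟨D, P, T, S⟩ := O
      simp only [pvStepA, pvStepB]
      have hkd : k < dl.length := by omega
      have hkp : k < pl.length := by omega
      rw [pvGet_rev dl k hkd, pvGet_rev pl k hkp]
      rw [pvWhileA_eq _ _ _ _ _ hc]
      set e1 := PySem.List.pyGetD dl ((dl.length : Int) - ((k:Int) + 1)) 0 with he1
      set e2 := PySem.List.pyGetD pl ((pl.length : Int) - ((k:Int) + 1)) 0 with he2
      have r1 : D - cap * T + e1 = (D + e1) - cap * T := by ring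
      have r2 : P - cap * T + e2 = (P + e2) - cap * T := by ring
      rw [r1, r2, pvCdiv_sub_mul _ _ _ hc, pvCdiv_sub_mul _ _ _ hc]
      set a := pvCdiv (D + e1) cap with ha
      set b := pvCdiv (P + e2) cap with hb
      have hneed : max (-(PySem.Int.floordiv (-(D + e1)) cap)) (-(PySem.Int.floordiv (-(P + e2))  cap)) = max a b := rfl
      rw [hneed]
      rw [pvIteMax, pvMaxShift]
      refine ⟨?_, le_trans ihT (le_max_right _ _)⟩
      refine Prod.ext ?_ (Prod.ext ?_ ?_) <;> simp only [] <;> ring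

-- ===== VERDICT (by name: the statement is the Claim_ definition above) =====
theorem solution_spec : Claim_equal_solution := by
  intro cap n dl pl _hdom hpre
  obtain ⟨hc, hd, hp⟩ := hpre
  unfold Spec_solution solution solution_alt
  simp only [PySem.List.slice?_none_none_neg_one, Option.getD_some]
  by_cases hn : n ≤ 0
  · rw [PySem.List.pyRange_one_eq_nil (by omega), PySem.List.pyRange_one_eq_nil (by omega)]
    simp
  · have h0 : (0:Int) ≤ n := by omega
    have hcast : ((n.toNat : Int)) = n := Int.toNat_of_nonneg h0
    have hinv := pvInvariant cap n dl pl hc hd hp n.toNat (by rw [hcast])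
    rw [hcast] at hinv
    rw [hinv.1]
    ring
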